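-- pv_equiv track=rewrite | github.com/the-tulkun-way/navi-lang-translation | src/navi_lang_translation/orthography.py | combine_syllable_strings
-- ===== SOURCE A (Python) =====
-- def combine_syllable_strings(list_with_substrings):
--     combined_string = ""
--
--     for item in list_with_substrings:
--         # Check if the item is a string and not "UNK"
--         if isinstance(item, str) and item != "UNK":
--             combined_string += item
--         elif item == "UNK":
--             combined_string = "UNK"
--
--     return combined_string
-- ===== SOURCE B (Python) =====
-- def combine_syllable_strings(list_with_substrings):
--     # Scan from the end for the last "UNK" marker; everything before it is discarded,
--     # so the result is "UNK" plus the joined string items after it (or the join of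
--     # all string items if there is no marker).
--     for i in range(len(list_with_substrings) - 1, -1, -1):
--         if list_with_substrings[i] == "UNK":
--             tail = list_with_substrings[i + 1:]
--             return "UNK" + "".join(s for s in tail if isinstance(s, str) and s != "UNK")
--     return "".join(s for s in list_with_substrings if isinstance(s, str) and s != "UNK")
-- ===== Notes on version B (the rewrite author's own statement) =====
-- stated objective: alternative
-- what changed: B replaces the destructive reset-accumulator loop by locating the last 'UNK' marker with a reverse scan and returning 'UNK' plus one join over the suffix after it (or a join over the whole list when no marker exists).
import Mathlib
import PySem

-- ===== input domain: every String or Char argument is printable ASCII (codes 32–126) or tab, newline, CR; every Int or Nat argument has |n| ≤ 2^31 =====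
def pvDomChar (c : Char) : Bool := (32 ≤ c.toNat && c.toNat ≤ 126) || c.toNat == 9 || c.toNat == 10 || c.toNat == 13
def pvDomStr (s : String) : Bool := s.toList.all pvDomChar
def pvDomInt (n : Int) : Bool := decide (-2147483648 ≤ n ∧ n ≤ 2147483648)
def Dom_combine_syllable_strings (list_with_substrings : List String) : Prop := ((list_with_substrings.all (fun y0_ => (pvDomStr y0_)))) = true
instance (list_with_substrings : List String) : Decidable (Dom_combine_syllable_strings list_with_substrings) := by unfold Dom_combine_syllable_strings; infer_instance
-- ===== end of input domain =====

-- B locates the last "UNK" marker by a reverse scan and joins the suffix after it,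
-- instead of A's destructive reset-accumulator loop (objective: alternative).


-- ===== PORT A =====
-- for item in list: if item != "UNK": combined += item elif item == "UNK": combined = "UNK"
def combine_syllable_strings (list_with_substrings : List String) : String :=
  list_with_substrings.foldl
    (fun combined_string item =>
      if item ≠ "UNK" then combined_string ++ item else "UNK")
    ""

-- ===== PORT B =====
-- reverse scan giving the index (counted from the front) of the last "UNK", if any
def pvLastUNK : List String → Option Nat
  | [] => none
  | x :: xs =>
    match pvLastUNK xs with
    | some i => some (i + 1)
    | none => if x = "UNK" then some 0 else none

def combine_syllable_strings_alt (list_with_substrings : List String) : String :=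
  match pvLastUNK list_with_substrings with
  | some i =>
      "UNK" ++ String.join (((list_with_substrings.drop (i + 1)).filter (fun s => s ≠ "UNK")))
  | none => String.join (list_with_substrings.filter (fun s => s ≠ "UNK"))

-- ===== PRECONDITION & SPEC =====
def Spec_combine_syllable_strings (list_with_substrings : List String) (out : String) : Prop := out = combine_syllable_strings_alt list_with_substrings
instance (list_with_substrings : List String) (out : String) : Decidable (Spec_combine_syllable_strings list_with_substrings out) := by unfold Spec_combine_syllable_strings; infer_instance

-- ===== CLAIM (what is proved, stated in full; the proofs are below) =====
def Claim_equal_combine_syllable_strings : Prop := ∀ (list_with_substrings : List String), Dom_combine_syllable_strings list_with_substrings → Spec_combine_syllable_strings list_with_substrings (combine_syllable_strings list_with_substrings)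

-- ===== LEMMAS AND PROOFS =====
theorem join_cons (x : String) (xs : List String) :
    String.join (x :: xs) = x ++ String.join xs := by
  simp [String.join]
  induction xs generalizing x with
  | nil => simp
  | cons y ys ih => simp [List.foldl, ih (x ++ y), ih y, String.append_assoc]

theorem fold_char (l : List String) (acc : String) :
    l.foldl (fun c item => if item ≠ "UNK" then c ++ item else "UNK") acc =
      match pvLastUNK l with
      | some i => "UNK" ++ String.join (((l.drop (i + 1)).filter (fun s => s ≠ "UNK")))
      | none => acc ++ String.join (l.filter (fun s => s ≠ "UNK")) := by
  induction l generalizing acc with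
  | nil => simp [pvLastUNK, String.join]
  | cons x xs ih =>
    by_cases hx : x = "UNK"
    · subst hx
      simp only [List.foldl, pvLastUNK, ne_eq, not_true_eq_false, if_false, if_true]
      rw [ih "UNK"]
      cases h : pvLastUNK xs with
      | some i => simp
      | none => simp
    · simp only [List.foldl, if_pos (by simpa using hx), pvLastUNK]
      rw [ih (acc ++ x)]
      cases h : pvLastUNK xs with
      | some i => simp
      | none => simp [hx, join_cons, String.append_assoc]

-- ===== VERDICT (by name: the statement is the Claim_ definition above) =====
theorem combine_syllable_strings_spec : Claim_equal_combine_syllable_strings := by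
  intro l _
  unfold Spec_combine_syllable_strings combine_syllable_strings combine_syllable_strings_alt
  rw [fold_char]
  cases h : pvLastUNK l <;> simp
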